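-- pv_equiv track=rewrite | github.com/stefrabre1/interviewPrep | slidingWindow.py | findGivenSum
-- ===== SOURCE A (Python) =====
-- def findGivenSum(arr, n):
--     indices = []
--
--     for i in range(len(arr)):
--         sum = 0
--         for j in range(len(arr) - i):
--             if j == 0 and arr[i + j] == 0:
--                 break
--             sum += arr[i + j]
--             if sum == n:
--                 indices.append((i, j+1))
--                 break
--             if sum > n:
--                 break
--     return indices
-- ===== SOURCE B (Python) =====
-- def findGivenSum(arr, n):
--     # Prefix-sum reformulation: A's inner loop stops at the first position where the
--     # running sum reaches >= n, recording it only on exact equality.  B precomputes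
--     # prefix sums once and, per start index (skipping zero starts), looks up the first
--     # prefix crossing the threshold and checks it for equality.
--     prefix = [0]
--     for x in arr:
--         prefix.append(prefix[-1] + x)
--     result = []
--     for i, x in enumerate(arr):
--         if x == 0:
--             continue
--         target = prefix[i] + n
--         m = next((m for m in range(i + 1, len(prefix)) if prefix[m] >= target), None)
--         if m is not None and prefix[m] == target:
--             result.append((i, m - i))
--     return result
-- ===== Notes on version B (the rewrite author's own statement) =====
-- stated objective: alternative
-- what changed: B precomputes the list of prefix sums once and, per start index, finds the first prefix crossing the threshold prefix[i]+n and tests it for exact equality, instead of A's per-start running-sum accumulation with three-way break logic.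
import Mathlib
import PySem

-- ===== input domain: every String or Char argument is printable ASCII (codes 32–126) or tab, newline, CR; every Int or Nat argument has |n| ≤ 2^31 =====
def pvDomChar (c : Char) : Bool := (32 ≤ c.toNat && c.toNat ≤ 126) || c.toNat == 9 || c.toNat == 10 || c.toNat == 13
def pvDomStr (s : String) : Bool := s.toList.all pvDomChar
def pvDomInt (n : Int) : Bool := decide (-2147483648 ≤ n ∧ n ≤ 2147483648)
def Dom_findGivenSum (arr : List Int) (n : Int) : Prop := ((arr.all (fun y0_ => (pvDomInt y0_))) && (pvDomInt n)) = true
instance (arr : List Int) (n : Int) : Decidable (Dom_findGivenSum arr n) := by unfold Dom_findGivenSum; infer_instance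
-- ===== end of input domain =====

-- B replaces A's per-start running-sum loop with precomputed prefix sums and a
-- first-threshold-crossing search (objective: alternative; same asymptotic cost).

-- ===== PORT A =====
-- inner 'for j in range(len(arr)-i)' loop of A: fuel = remaining iterations, state (j, sum);
-- returns the pairs appended during this inner loop ([] or one pair).  arr[i+j] is always
-- in range here, so pyGetD is exact.
def pvInnerA (arr : List Int) (n : Int) (i : Int) : Nat → Int → Int → List (Int × Int)
  | 0, _, _ => []
  | rem + 1, j, s =>
    if j = 0 ∧ PySem.List.pyGetD arr (i + j) 0 = 0 then []
    else if s + PySem.List.pyGetD arr (i + j) 0 = n then [(i, j + 1)]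
    else if s + PySem.List.pyGetD arr (i + j) 0 > n then []
    else pvInnerA arr n i rem (j + 1) (s + PySem.List.pyGetD arr (i + j) 0)

def findGivenSum (arr : List Int) (n : Int) : List (Int × Int) :=
  (PySem.List.pyRange 0 arr.length 1).foldl
    (fun indices i => indices ++ pvInnerA arr n i ((arr.length : Int) - i).toNat 0 0) []

-- ===== PORT B =====
-- prefix = [0]; for x in arr: prefix.append(prefix[-1] + x)   (prefix is nonempty, so getLastD is exact)
def pvPrefix (arr : List Int) : List Int :=
  arr.foldl (fun p x => p ++ [p.getLastD 0 + x]) [0]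

def findGivenSum_alt (arr : List Int) (n : Int) : List (Int × Int) :=
  (PySem.List.enumerate arr 0).foldl
    (fun (result : List (Int × Int)) (ix : Int × Int) =>
      if ix.2 = 0 then result
      else
        match (PySem.List.pyRange (ix.1 + 1) (pvPrefix arr).length 1).find?
                (fun m => decide (PySem.List.pyGetD (pvPrefix arr) ix.1 0 + n ≤
                                  PySem.List.pyGetD (pvPrefix arr) m 0)) with
        | some m =>
            if PySem.List.pyGetD (pvPrefix arr) m 0 = PySem.List.pyGetD (pvPrefix arr) ix.1 0 + n
            then result ++ [(ix.1, m - ix.1)] else result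
        | none => result) []

-- ===== PRECONDITION & SPEC =====
def Spec_findGivenSum (arr : List Int) (n : Int) (out : List (Int × Int)) : Prop := out = findGivenSum_alt arr n
instance (arr : List Int) (n : Int) (out : List (Int × Int)) : Decidable (Spec_findGivenSum arr n out) := by unfold Spec_findGivenSum; infer_instance

-- ===== CLAIM (what is proved, stated in full; the proofs are below) =====
def Claim_equal_findGivenSum : Prop := ∀ (arr : List Int) (n : Int), Dom_findGivenSum arr n → Spec_findGivenSum arr n (findGivenSum arr n)

-- ===== LEMMAS AND PROOFS =====

-- prefix sum of the first k elements
def pvS (arr : List Int) (k : Nat) : Int := (arr.take k).sum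

-- the common reference value both ports are shown to compute, per start index
def pvRefAt (arr : List Int) (n : Int) (i : Nat) : List (Int × Int) :=
  if arr.getD i 0 = 0 then []
  else
    match (List.range (arr.length - i)).find?
            (fun k => decide (n ≤ pvS arr (i + 1 + k) - pvS arr i)) with
    | some k => if pvS arr (i + 1 + k) - pvS arr i = n then [((i : Int), ((k : Int) + 1))] else []
    | none => []

def pvRef (arr : List Int) (n : Int) : List (Int × Int) :=
  (List.range arr.length).flatMap (fun i => pvRefAt arr n i)

def pvScan (s : Int) : List Int → List Int
  | [] => []
  | x :: xs => (s + x) :: pvScan (s + x) xs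

theorem pvScan_length (arr : List Int) : ∀ s, (pvScan s arr).length = arr.length := by
  induction arr with
  | nil => intro s; rfl
  | cons x xs ih => intro s; simp [pvScan, ih]

theorem pvFoldl_prefix (arr : List Int) : ∀ (p : List Int) (s : Int), p.getLastD 0 = s →
    arr.foldl (fun p x => p ++ [p.getLastD 0 + x]) p = p ++ pvScan s arr := by
  induction arr with
  | nil => intro p s _; simp [pvScan]
  | cons x xs ih =>
    intro p s hs
    simp only [List.foldl_cons, hs]
    rw [ih (p ++ [s + x]) (s + x) (by simp)]
    simp [pvScan]

theorem pvPrefix_eq (arr : List Int) : pvPrefix arr = 0 :: pvScan 0 arr := by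
  unfold pvPrefix
  rw [pvFoldl_prefix arr [0] 0 rfl]
  rfl

theorem pvS_succ (arr : List Int) (k : Nat) (hk : k < arr.length) :
    pvS arr (k + 1) = pvS arr k + arr.getD k 0 := by
  unfold pvS
  rw [List.sum_take_succ arr k hk]
  simp [List.getD_eq_getElem?_getD, List.getElem?_eq_getElem hk]

theorem pvScan_getD (arr : List Int) : ∀ (k : Nat) (s : Int), k < arr.length →
    (pvScan s arr).getD k 0 = s + pvS arr (k + 1) - pvS arr 0 := by
  induction arr with
  | nil => intro k s h; simp at h
  | cons x xs ih =>
    intro k s h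
    cases k with
    | zero => simp [pvScan, pvS]
    | succ k =>
      simp only [pvScan, List.getD_cons_succ]
      have hk : k < xs.length := by simpa using h
      rw [ih k (s + x) hk]
      simp [pvS, List.sum_cons]
      ring

theorem pvPrefix_getD (arr : List Int) (k : Nat) (hk : k ≤ arr.length) :
    (pvPrefix arr).getD k 0 = pvS arr k := by
  rw [pvPrefix_eq]
  cases k with
  | zero => simp [pvS]
  | succ k =>
    simp only [List.getD_cons_succ]
    rw [pvScan_getD arr k 0 (by omega)]
    simp [pvS]

theorem pvPrefix_length (arr : List Int) : (pvPrefix arr).length = arr.length + 1 := by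
  rw [pvPrefix_eq]; simp [pvScan_length]

-- characterisation of A's inner loop from an arbitrary reachable state
theorem pvInnerA_char (arr : List Int) (n : Int) (i : Nat) (_hi : i < arr.length) :
    ∀ (rem j : Nat) (s : Int), i + j + rem = arr.length →
    s = pvS arr (i + j) - pvS arr i → (j = 0 → arr.getD i 0 ≠ 0) →
    pvInnerA arr n (i : Int) rem (j : Int) s =
      match (List.range rem).find? (fun k => decide (n ≤ pvS arr (i + j + 1 + k) - pvS arr i)) with
      | some k => if pvS arr (i + j + 1 + k) - pvS arr i = n then [((i : Int), ((j : Int) + (k : Int) + 1))] else []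
      | none => [] := by
  intro rem
  induction rem with
  | zero => intro j s _ _ _; simp [pvInnerA]
  | succ rem ih =>
    intro j s hlen hs hj0
    have hij : i + j < arr.length := by omega
    have hx : PySem.List.pyGetD arr ((i : Int) + (j : Int)) 0 = arr.getD (i + j) 0 := by
      rw [show ((i : Int) + (j : Int)) = ((i + j : Nat) : Int) by push_cast; ring,
          PySem.List.pyGetD_natCast]
    have hcond : ¬ ((j : Int) = 0 ∧ PySem.List.pyGetD arr ((i : Int) + (j : Int)) 0 = 0) := by
      rcases Nat.eq_zero_or_pos j with hj | hj
      · subst hj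
        intro h
        exact hj0 rfl (by simpa [hx] using h.2)
      · intro h
        omega
    have hsum : s + PySem.List.pyGetD arr ((i : Int) + (j : Int)) 0 =
        pvS arr (i + j + 1) - pvS arr i := by
      rw [hx, hs, pvS_succ arr (i + j) hij]; ring
    rw [pvInnerA, if_neg hcond, hsum]
    rw [List.range_succ_eq_map]
    by_cases h1 : pvS arr (i + j + 1) - pvS arr i = n
    · rw [if_pos h1, List.find?_cons_of_pos (by simp; omega)]
      simp [h1]
    · by_cases h2 : pvS arr (i + j + 1) - pvS arr i > n
      · rw [if_neg h1, if_pos h2, List.find?_cons_of_pos (by simp; omega)]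
        simp only []
        rw [if_neg (by simpa using h1)]
      · have hlt : pvS arr (i + j + 1) - pvS arr i < n := by omega
        rw [if_neg h1, if_neg h2, List.find?_cons_of_neg (by simp; omega)]
        rw [show ((j : Int) + 1) = ((j + 1 : Nat) : Int) by push_cast; ring]
        conv_lhs => rw [show i + j + 1 = i + (j + 1) by omega]
        rw [ih (j + 1) _ (by omega) rfl (by intro h; omega)]
        rw [List.find?_map]
        have hpq : (fun k => decide (n ≤ pvS arr (i + (j + 1) + 1 + k) - pvS arr i)) =
            ((fun k => decide (n ≤ pvS arr (i + j + 1 + k) - pvS arr i)) ∘ Nat.succ) := by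
          funext k
          rw [Function.comp_apply, show i + j + 1 + Nat.succ k = i + (j + 1) + 1 + k by omega]
        rw [hpq]
        rcases hfind : (List.range rem).find?
            ((fun k => decide (n ≤ pvS arr (i + j + 1 + k) - pvS arr i)) ∘ Nat.succ) with _ | k
        · rfl
        · simp only [Option.map_some]
          rw [show i + (j + 1) + 1 + k = i + j + 1 + Nat.succ k by omega]
          split_ifs with h
          · congr 2
            push_cast
            ring
          · rfl

theorem pvFind?_congr {α : Type} (l : List α) (p q : α → Bool) (h : ∀ a ∈ l, p a = q a) :
    l.find? p = l.find? q := by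
  induction l with
  | nil => rfl
  | cons x xs ih =>
    rw [List.find?_cons, List.find?_cons, h x (by simp)]
    cases hq : q x
    · exact ih (fun a ha => h a (by simp [ha]))
    · rfl

theorem pvInnerA_top (arr : List Int) (n : Int) (i : Nat) (hi : i < arr.length) :
    pvInnerA arr n (i : Int) (arr.length - i) 0 0 = pvRefAt arr n i := by
  unfold pvRefAt
  by_cases h0 : arr.getD i 0 = 0
  · rw [if_pos h0]
    obtain ⟨r, hr⟩ : ∃ r, arr.length - i = r + 1 := ⟨arr.length - i - 1, by omega⟩
    rw [hr, pvInnerA, if_pos]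
    refine ⟨rfl, ?_⟩
    rw [show ((i : Int) + 0) = ((i : Nat) : Int) by ring, PySem.List.pyGetD_natCast]
    exact h0
  · rw [if_neg h0]
    have hchar := pvInnerA_char arr n i hi (arr.length - i) 0 0 (by omega) (by simp) (fun _ => h0)
    simp only [Nat.cast_zero] at hchar
    rw [hchar]
    simp only [Nat.add_zero, zero_add]

theorem pvA_eq_ref (arr : List Int) (n : Int) : findGivenSum arr n = pvRef arr n := by
  unfold findGivenSum pvRef
  have h1 : PySem.List.pyRange 0 (arr.length) 1 = List.map (fun (k : Nat) => (k : Int)) (List.range arr.length) := by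
    rw [PySem.List.pyRange_one, show ((arr.length : Int) - 0).toNat = arr.length by omega]
    apply List.map_congr_left
    intro a _
    omega
  rw [h1, List.foldl_map, PySem.List.foldl_append_eq_flatMap, List.nil_append]
  rw [List.flatMap_def, List.flatMap_def]
  congr 1
  apply List.map_congr_left
  intro i hi
  rw [List.mem_range] at hi
  rw [show (((arr.length : Int)) - (i : Int)).toNat = arr.length - i by omega]
  exact pvInnerA_top arr n i hi

-- the value port B contributes for start index k
def pvGB (arr : List Int) (n : Int) (k : Nat) : List (Int × Int) :=
  if arr.getD k 0 = 0 then []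
  else
    match (PySem.List.pyRange ((k : Int) + 1) (pvPrefix arr).length 1).find?
            (fun m => decide (PySem.List.pyGetD (pvPrefix arr) (k : Int) 0 + n ≤
                              PySem.List.pyGetD (pvPrefix arr) m 0)) with
    | some m =>
        if PySem.List.pyGetD (pvPrefix arr) m 0 = PySem.List.pyGetD (pvPrefix arr) (k : Int) 0 + n
        then [((k : Int), m - (k : Int))] else []
    | none => []

theorem pvGB_eq_refAt (arr : List Int) (n : Int) (i : Nat) (hi : i < arr.length) :
    pvGB arr n i = pvRefAt arr n i := by
  unfold pvGB pvRefAt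
  by_cases h0 : arr.getD i 0 = 0
  · rw [if_pos h0, if_pos h0]
  · rw [if_neg h0, if_neg h0]
    have hgi : PySem.List.pyGetD (pvPrefix arr) (i : Int) 0 = pvS arr i := by
      rw [PySem.List.pyGetD_natCast, pvPrefix_getD arr i (by omega)]
    have hlen : (((pvPrefix arr).length : Int) - ((i : Int) + 1)).toNat = arr.length - i := by
      rw [pvPrefix_length]; omega
    rw [PySem.List.pyRange_one, hlen, List.find?_map]
    have hcongr := pvFind?_congr (List.range (arr.length - i))
      ((fun m => decide (PySem.List.pyGetD (pvPrefix arr) (i : Int) 0 + n ≤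
                         PySem.List.pyGetD (pvPrefix arr) m 0)) ∘ (fun k => (i : Int) + 1 + (k : Int)))
      (fun k => decide (n ≤ pvS arr (i + 1 + k) - pvS arr i))
      ?_
    · rw [hcongr]
      rcases hfind : (List.range (arr.length - i)).find?
          (fun k => decide (n ≤ pvS arr (i + 1 + k) - pvS arr i)) with _ | k
      · rfl
      · have hk : k < arr.length - i := by
          have := List.mem_of_find?_eq_some hfind
          simpa using this
        have hgk : PySem.List.pyGetD (pvPrefix arr) ((i : Int) + 1 + (k : Int)) 0 =
            pvS arr (i + 1 + k) := by
          rw [show ((i : Int) + 1 + (k : Int)) = ((i + 1 + k : Nat) : Int) by push_cast; ring,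
              PySem.List.pyGetD_natCast, pvPrefix_getD arr (i + 1 + k) (by omega)]
        simp only [Option.map_some, hgk, hgi]
        split_ifs with ha hb hb
        · congr 2
          ring
        · omega
        · omega
        · rfl
    · intro k hkmem
      rw [List.mem_range] at hkmem
      have hgk : PySem.List.pyGetD (pvPrefix arr) ((i : Int) + 1 + (k : Int)) 0 =
          pvS arr (i + 1 + k) := by
        rw [show ((i : Int) + 1 + (k : Int)) = ((i + 1 + k : Nat) : Int) by push_cast; ring,
            PySem.List.pyGetD_natCast, pvPrefix_getD arr (i + 1 + k) (by omega)]
      rw [Function.comp_apply, hgk, hgi]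
      exact decide_eq_decide.mpr (by omega)

theorem pvB_eq_ref (arr : List Int) (n : Int) : findGivenSum_alt arr n = pvRef arr n := by
  unfold findGivenSum_alt pvRef
  rw [PySem.List.enumerate_eq_map_pyRange (d := 0)]
  have h1 : PySem.List.pyRange 0 (arr.length) 1 = List.map (fun (k : Nat) => (k : Int)) (List.range arr.length) := by
    rw [PySem.List.pyRange_one, show ((arr.length : Int) - 0).toNat = arr.length by omega]
    apply List.map_congr_left
    intro a _
    omega
  rw [PySem.List.len_eq, h1, List.map_map, List.foldl_map]
  have hbody : (fun (result : List (Int × Int)) (k : Nat) =>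
      (fun (result : List (Int × Int)) (ix : Int × Int) =>
        if ix.2 = 0 then result
        else
          match (PySem.List.pyRange (ix.1 + 1) (pvPrefix arr).length 1).find?
                  (fun m => decide (PySem.List.pyGetD (pvPrefix arr) ix.1 0 + n ≤
                                    PySem.List.pyGetD (pvPrefix arr) m 0)) with
          | some m =>
              if PySem.List.pyGetD (pvPrefix arr) m 0 = PySem.List.pyGetD (pvPrefix arr) ix.1 0 + n
              then result ++ [(ix.1, m - ix.1)] else result
          | none => result)
        result (((fun (j : Int) => (j, PySem.List.pyGetD arr j 0)) ∘ (fun (k : Nat) => (k : Int))) k)) =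
      (fun (result : List (Int × Int)) (k : Nat) => result ++ pvGB arr n k) := by
    funext res k
    simp only [Function.comp_apply]
    unfold pvGB
    rw [PySem.List.pyGetD_natCast]
    by_cases h : arr.getD k 0 = 0
    · rw [if_pos h, if_pos h, List.append_nil]
    · rw [if_neg h, if_neg h]
      show (match (PySem.List.pyRange ((k : Int) + 1) ((pvPrefix arr).length : Int) 1).find?
              (fun m => decide (PySem.List.pyGetD (pvPrefix arr) (k : Int) 0 + n ≤
                                PySem.List.pyGetD (pvPrefix arr) m 0)) with
            | some m =>
                if PySem.List.pyGetD (pvPrefix arr) m 0 = PySem.List.pyGetD (pvPrefix arr) (k : Int) 0 + n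
                then res ++ [((k : Int), m - (k : Int))] else res
            | none => res) =
           res ++ (match (PySem.List.pyRange ((k : Int) + 1) ((pvPrefix arr).length : Int) 1).find?
              (fun m => decide (PySem.List.pyGetD (pvPrefix arr) (k : Int) 0 + n ≤
                                PySem.List.pyGetD (pvPrefix arr) m 0)) with
            | some m =>
                if PySem.List.pyGetD (pvPrefix arr) m 0 = PySem.List.pyGetD (pvPrefix arr) (k : Int) 0 + n
                then [((k : Int), m - (k : Int))] else []
            | none => [])
      generalize (PySem.List.pyRange ((k : Int) + 1) ((pvPrefix arr).length : Int) 1).find?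
          (fun m => decide (PySem.List.pyGetD (pvPrefix arr) (k : Int) 0 + n ≤
                            PySem.List.pyGetD (pvPrefix arr) m 0)) = o
      cases o with
      | none => simp
      | some m =>
        show (if PySem.List.pyGetD (pvPrefix arr) m 0 = PySem.List.pyGetD (pvPrefix arr) (k : Int) 0 + n
              then res ++ [((k : Int), m - (k : Int))] else res) =
             res ++ (if PySem.List.pyGetD (pvPrefix arr) m 0 = PySem.List.pyGetD (pvPrefix arr) (k : Int) 0 + n
              then [((k : Int), m - (k : Int))] else [])
        split_ifs <;> simp
  rw [hbody, PySem.List.foldl_append_eq_flatMap, List.nil_append]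
  rw [List.flatMap_def, List.flatMap_def]
  congr 1
  apply List.map_congr_left
  intro i hi
  rw [List.mem_range] at hi
  exact pvGB_eq_refAt arr n i hi

-- ===== VERDICT (by name: the statement is the Claim_ definition above) =====
theorem findGivenSum_spec : Claim_equal_findGivenSum := by
  intro arr n _
  unfold Spec_findGivenSum
  rw [pvA_eq_ref, pvB_eq_ref]
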